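-- pv_equiv track=rewrite | github.com/Shuke1999/cascade-camp-hands-on | code/evaluator_iob.py | tag_tokens
-- ===== SOURCE A (Python) =====
-- def tag_tokens(text, entities_dict):
--     tokens = text.split()
--     labels = ['O'] * len(tokens)
--
--     for entity_type, mentions in entities_dict.items():
--         for mention in mentions:
--             mention_tokens = mention.split()
--             for i in range(len(tokens) - len(mention_tokens) + 1):
--                 if tokens[i:i+len(mention_tokens)] == mention_tokens:
--                     labels[i] = f'B-{entity_type}'
--                     for j in range(1, len(mention_tokens)):
--                         labels[i+j] = f'I-{entity_type}'
--                     break  # only first match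
--     return tokens, labels
-- ===== SOURCE B (Python) =====
-- def _first_occurrence(tokens, phrase, positions):
--     """Index of the first occurrence of the token sequence `phrase` in `tokens`,
--     or None if it does not occur. Like str.find, the empty sequence occurs at 0.
--     `positions` maps each token to its sorted list of indices in `tokens`, so only
--     positions where the first token of `phrase` occurs are candidate starts."""
--     if not phrase:
--         return 0
--     m = len(phrase)
--     for p in positions.get(phrase[0], []):
--         if tokens[p:p + m] == phrase:
--             return p
--     return None
--
--
-- def tag_tokens(text, entities_dict):
--     tokens = text.split()
--     positions = {}
--     for i, tok in enumerate(tokens):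
--         positions.setdefault(tok, []).append(i)
--     labels = ['O'] * len(tokens)
--     for entity_type, mentions in entities_dict.items():
--         for mention in mentions:
--             mtoks = mention.split()
--             p = _first_occurrence(tokens, mtoks, positions)
--             if p is not None:
--                 labels[p] = 'B-' + entity_type
--                 for j in range(1, len(mtoks)):
--                     labels[p + j] = 'I-' + entity_type
--     return tokens, labels
-- ===== Notes on version B (the rewrite author's own statement) =====
-- stated objective: faster
-- what changed: B builds a one-pass token->positions index and locates each mention with a first-occurrence helper that probes only the positions where the mention's first token occurs, instead of A's full left-to-right window scan per mention.
import Mathlib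
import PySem

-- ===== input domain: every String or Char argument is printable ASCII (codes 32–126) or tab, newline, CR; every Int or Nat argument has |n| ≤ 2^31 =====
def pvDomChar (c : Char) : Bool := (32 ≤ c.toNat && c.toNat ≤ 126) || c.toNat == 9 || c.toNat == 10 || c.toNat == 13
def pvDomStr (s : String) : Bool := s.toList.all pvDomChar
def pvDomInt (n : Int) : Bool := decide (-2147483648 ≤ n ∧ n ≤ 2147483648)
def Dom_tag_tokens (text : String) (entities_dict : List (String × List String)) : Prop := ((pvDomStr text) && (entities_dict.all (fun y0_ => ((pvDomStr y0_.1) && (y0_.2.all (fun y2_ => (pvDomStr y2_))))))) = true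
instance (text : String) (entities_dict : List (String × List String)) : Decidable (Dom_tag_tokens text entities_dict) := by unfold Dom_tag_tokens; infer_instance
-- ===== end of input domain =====

-- B replaces A's full window scan per mention by a one-pass token→positions index and a
-- first-occurrence helper probing only the candidate start positions of each mention's
-- first token (objective: faster).

-- ===== PORT A =====
-- A: 'labels[idx] = v'; whenever A executes it the index is a valid non-negative index
-- (except on the inputs excluded by Pre_, where Python raises IndexError), so List.set is exact.
def pvSetA (ls : List String) (i : Int) (v : String) : List String := ls.set i.toNat v

-- A: labels[i] = f'B-{t}'; for j in range(1, len(mention_tokens)): labels[i+j] = f'I-{t}'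
def pvTagA (labels : List String) (i : Int) (mlen : Nat) (t : String) : List String :=
  (PySem.List.pyRange 1 (mlen : Int) 1).foldl (fun ls j => pvSetA ls (i + j) ("I-" ++ t))
    (pvSetA labels i ("B-" ++ t))

-- A: 'for i in range(…): if tokens[i:i+len(mention_tokens)] == mention_tokens: …; break'
def pvScanA (tokens mtoks : List String) (t : String) (labels : List String) :
    List Int → List String
  | [] => labels
  | i :: rest =>
    if PySem.List.slice tokens (some i) (some (i + (mtoks.length : Int))) = mtoks then
      pvTagA labels i mtoks.length t
    else pvScanA tokens mtoks t labels rest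

def tag_tokens (text : String) (entities_dict : List (String × List String)) :
    List String × List String :=
  let tokens := PySem.Str.split₀ text
  let labels := List.replicate tokens.length "O"
  let labels := (PySem.Dict.ofList entities_dict).items.foldl
    (fun labels ev =>
      ev.2.foldl (fun labels mention =>
        let mtoks := PySem.Str.split₀ mention
        pvScanA tokens mtoks ev.1 labels
          (PySem.List.pyRange 0 ((tokens.length : Int) - (mtoks.length : Int) + 1) 1)) labels)
    labels
  (tokens, labels)

-- ===== PORT B =====
-- B: 'for p in positions.get(phrase[0], []): if tokens[p:p+m] == phrase: return p / return None'
def pvFindB (tokens mtoks : List String) : List Int → Option Int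
  | [] => none
  | p :: rest =>
    if PySem.List.slice tokens (some p) (some (p + (mtoks.length : Int))) = mtoks then
      some p
    else pvFindB tokens mtoks rest

-- B: _first_occurrence(tokens, phrase, positions)
def pvFirstOcc (tokens mtoks : List String) (positions : PySem.Dict String (List Int)) :
    Option Int :=
  match mtoks with
  | [] => some 0
  | t0 :: _ => pvFindB tokens mtoks (positions.getD t0 [])

-- B: labels[p] = 'B-'+t; for j in range(1, len(mtoks)): labels[p+j] = 'I-'+t
-- (valid non-negative indices whenever B executes it inside Pre_, so List.set is exact)
def pvTagB (labels : List String) (p : Int) (mlen : Nat) (t : String) : List String :=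
  (PySem.List.pyRange 1 (mlen : Int) 1).foldl (fun ls j => ls.set (p + j).toNat ("I-" ++ t))
    (labels.set p.toNat ("B-" ++ t))

def tag_tokens_alt (text : String) (entities_dict : List (String × List String)) :
    List String × List String :=
  let tokens := PySem.Str.split₀ text
  -- positions.setdefault(tok, []).append(i)
  let positions := (PySem.List.enumerate tokens 0).foldl
    (fun d q => d.modify q.2 [] (fun l => l ++ [q.1])) PySem.Dict.empty
  let labels := List.replicate tokens.length "O"
  let labels := (PySem.Dict.ofList entities_dict).items.foldl
    (fun labels ev =>
      ev.2.foldl (fun labels mention =>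
        let mtoks := PySem.Str.split₀ mention
        match pvFirstOcc tokens mtoks positions with
        | none => labels
        | some p => pvTagB labels p mtoks.length ev.1) labels)
    labels
  (tokens, labels)

-- ===== PRECONDITION & SPEC =====
-- Pre_ excludes exactly the inputs where Python A raises IndexError (and Python B raises the
-- same IndexError): a text with no tokens together with some mention (in the dict) that splits
-- to no tokens (both then do labels[0] = … on an empty list).
def Pre_tag_tokens (text : String) (entities_dict : List (String × List String)) : Prop :=
  PySem.Str.split₀ text ≠ [] ∨
    ((PySem.Dict.ofList entities_dict).values.all
      (fun ms => ms.all (fun mention => !(PySem.Str.split₀ mention).isEmpty))) = true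
instance (text : String) (entities_dict : List (String × List String)) : Decidable (Pre_tag_tokens text entities_dict) := by unfold Pre_tag_tokens; infer_instance

def pvWitness_tag_tokens : String × (List (String × List String)) :=
  ("a b", [("PER", ["a"])])

def Spec_tag_tokens (text : String) (entities_dict : List (String × List String)) (out : List String × List String) : Prop := out = tag_tokens_alt text entities_dict
instance (text : String) (entities_dict : List (String × List String)) (out : List String × List String) : Decidable (Spec_tag_tokens text entities_dict out) := by unfold Spec_tag_tokens; infer_instance

-- ===== CLAIM (what is proved, stated in full; the proofs are below) =====
def Claim_equal_tag_tokens : Prop := ∀ (text : String) (entities_dict : List (String × List String)), Dom_tag_tokens text entities_dict → Pre_tag_tokens text entities_dict → Spec_tag_tokens text entities_dict (tag_tokens text entities_dict)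

-- ===== LEMMAS AND PROOFS =====

-- A's scan-with-break is the first index matching the window, then the tag write.
theorem pvScanA_eq_find? (tokens mtoks : List String) (t : String) (labels : List String)
    (l : List Int) :
    pvScanA tokens mtoks t labels l =
      match l.find? (fun i => decide
          (PySem.List.slice tokens (some i) (some (i + (mtoks.length : Int))) = mtoks)) with
      | none => labels
      | some i => pvTagA labels i mtoks.length t := by
  induction l with
  | nil => rfl
  | cons i rest ih =>
    by_cases h : PySem.List.slice tokens (some i) (some (i + (mtoks.length : Int))) = mtoks
    · simp [pvScanA, h, List.find?]
    · simp [pvScanA, h, List.find?, ih]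

-- B's candidate probe is a find? over the candidate list.
theorem pvFindB_eq_find? (tokens mtoks : List String) (l : List Int) :
    pvFindB tokens mtoks l =
      l.find? (fun p => decide
        (PySem.List.slice tokens (some p) (some (p + (mtoks.length : Int))) = mtoks)) := by
  induction l with
  | nil => rfl
  | cons p rest ih =>
    by_cases h : PySem.List.slice tokens (some p) (some (p + (mtoks.length : Int))) = mtoks
    · simp [pvFindB, h, List.find?]
    · simp [pvFindB, h, List.find?, ih]

-- The index built by B lists, for each token, exactly its positions, in increasing order.
theorem pvIndex_getD (tokens : List String) (t0 : String) :
    (((PySem.List.enumerate tokens 0).foldl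
        (fun d q => d.modify q.2 [] (fun l => l ++ [q.1])) PySem.Dict.empty).getD t0 []) =
      (PySem.List.pyRange 0 (tokens.length : Int) 1).filter
        (fun j => PySem.List.pyGetD tokens j "" == t0) := by
  have h1 : (PySem.List.enumerate tokens 0).foldl
      (fun d q => d.modify q.2 [] (fun l => l ++ [q.1])) PySem.Dict.empty
      = ((PySem.List.enumerate tokens 0).map (fun q => (q.2, q.1))).foldl
        (fun d p => d.modify p.1 [] (fun l => l ++ [p.2])) PySem.Dict.empty := by
    rw [List.foldl_map]
  rw [h1, PySem.Dict.getD_foldl_modify_append, List.filter_map,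
    PySem.List.enumerate_eq_map_pyRange tokens ""]
  simp [List.filter_map, List.map_map, Function.comp_def, PySem.List.len]

-- A window match at an in-range position begins with the window's first token.
theorem pvMatch_head (tokens : List String) (t0 : String) (rest : List String) (k : Nat)
    (hk : k < tokens.length)
    (h : PySem.List.slice tokens (some (k : Int))
      (some ((k : Int) + ((t0 :: rest).length : Int))) = t0 :: rest) :
    PySem.List.pyGetD tokens (k : Int) "" = t0 := by
  rw [PySem.List.slice_natCast_add] at h
  rw [PySem.List.pyGetD_natCast, List.getD_eq_getElem tokens "" hk]
  have hdrop : tokens.drop k = tokens[k] :: tokens.drop (k+1) := List.drop_eq_getElem_cons hk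
  rw [hdrop] at h
  simp only [List.length_cons, List.take_succ_cons] at h
  exact (List.cons.injEq _ _ _ _ ▸ h : _ ∧ _).1

theorem pvFind?_congr {α : Type} (p q : α → Bool) : ∀ (l : List α),
    (∀ x ∈ l, p x = q x) → l.find? p = l.find? q
  | [], _ => rfl
  | x :: xs, h => by
    have hx := h x (List.mem_cons_self)
    by_cases hp : p x = true
    · rw [List.find?_cons_of_pos hp, List.find?_cons_of_pos (hx ▸ hp)]
    · rw [List.find?_cons_of_neg hp, List.find?_cons_of_neg (hx ▸ hp)]
      exact pvFind?_congr p q xs (fun y hy => h y (List.mem_cons_of_mem _ hy))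

-- A's window test fails at every start beyond the last feasible one.
theorem pvFind?_none_tail (tokens mtoks : List String) (a : Int) (ha0 : 0 ≤ a)
    (ha : (tokens.length : Int) - (mtoks.length : Int) + 1 ≤ a) (hm : mtoks ≠ []) :
    (PySem.List.pyRange a (tokens.length : Int) 1).find?
      (fun i => decide (PySem.List.slice tokens (some i)
        (some (i + (mtoks.length : Int))) = mtoks)) = none := by
  rw [List.find?_eq_none]
  intro j hj
  rw [PySem.List.mem_pyRange_one] at hj
  simp only [decide_eq_true_eq]
  intro hP
  obtain ⟨k, rfl⟩ : ∃ k : Nat, (k : Int) = j := ⟨j.toNat, by omega⟩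
  have hk : k < tokens.length := by exact_mod_cast hj.2
  have := by
    rw [PySem.List.slice_natCast_add] at hP
    have := congrArg List.length hP
    simpa [List.length_take, List.length_drop] using this
  have hm1 : 1 ≤ mtoks.length := List.length_pos_iff.mpr hm
  omega

-- The two searches find the same first position (non-empty mention).
theorem pvFind_eq (tokens : List String) (t0 : String) (rest : List String) :
    (PySem.List.pyRange 0 ((tokens.length : Int) - ((t0 :: rest).length : Int) + 1) 1).find?
        (fun i => decide (PySem.List.slice tokens (some i)
          (some (i + ((t0 :: rest).length : Int))) = t0 :: rest)) =
      pvFindB tokens (t0 :: rest)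
        (((PySem.List.enumerate tokens 0).foldl
          (fun d q => d.modify q.2 [] (fun l => l ++ [q.1])) PySem.Dict.empty).getD t0 []) := by
  rw [pvFindB_eq_find?, pvIndex_getD, List.find?_filter]
  have hsplit : (PySem.List.pyRange 0 (tokens.length : Int) 1).find?
        (fun i => decide (PySem.List.slice tokens (some i)
          (some (i + ((t0 :: rest).length : Int))) = t0 :: rest)) =
      (PySem.List.pyRange 0 ((tokens.length : Int) - ((t0 :: rest).length : Int) + 1) 1).find?
        (fun i => decide (PySem.List.slice tokens (some i)
          (some (i + ((t0 :: rest).length : Int))) = t0 :: rest)) := by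
    by_cases h : (tokens.length : Int) - ((t0 :: rest).length : Int) + 1 ≤ 0
    · rw [PySem.List.pyRange_one_eq_nil h]
      exact pvFind?_none_tail tokens (t0 :: rest) 0 le_rfl (by omega) (by simp)
    · rw [PySem.List.pyRange_one_append 0 ((tokens.length : Int) - ((t0 :: rest).length : Int) + 1)
          (tokens.length : Int) (by omega) (by simp), List.find?_append,
        pvFind?_none_tail tokens (t0 :: rest) _ (by omega) le_rfl (by simp), Option.or_none]
  rw [← hsplit]
  apply pvFind?_congr
  intro j hj
  rw [PySem.List.mem_pyRange_one] at hj
  obtain ⟨k, rfl⟩ : ∃ k : Nat, (k : Int) = j := ⟨j.toNat, by omega⟩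
  have hk : k < tokens.length := by exact_mod_cast hj.2
  by_cases hP : PySem.List.slice tokens (some (k : Int))
      (some ((k : Int) + ((t0 :: rest).length : Int))) = t0 :: rest
  · have hh := pvMatch_head tokens t0 rest k hk hP
    simp [hP, hh]
  · rw [show ((k : Int) + ((t0 :: rest).length : Int)) = ((k : Int) + ((rest.length : Int) + 1))
        from by push_cast [List.length_cons]; ring] at hP
    simp [hP]

-- The two tag-writing loops are the same computation.
theorem pvTagB_eq_pvTagA (labels : List String) (p : Int) (mlen : Nat) (t : String) :
    pvTagB labels p mlen t = pvTagA labels p mlen t := rfl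

-- Proof-only abbreviations for the two per-mention step functions (defeq to the port bodies).
def pvStepA (tokens : List String) (t : String) (labels : List String) (mention : String) :
    List String :=
  pvScanA tokens (PySem.Str.split₀ mention) t labels
    (PySem.List.pyRange 0
      ((tokens.length : Int) - ((PySem.Str.split₀ mention).length : Int) + 1) 1)

def pvStepB (tokens : List String) (t : String) (labels : List String) (mention : String) :
    List String :=
  match pvFirstOcc tokens (PySem.Str.split₀ mention)
      ((PySem.List.enumerate tokens 0).foldl
        (fun d q => d.modify q.2 [] (fun l => l ++ [q.1])) PySem.Dict.empty) with
  | none => labels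
  | some p => pvTagB labels p (PySem.Str.split₀ mention).length t

-- Per-mention step: both programs update the labels identically.
theorem pvMention_eq (tokens : List String) (t mention : String) (labels : List String) :
    pvStepA tokens t labels mention = pvStepB tokens t labels mention := by
  unfold pvStepA pvStepB
  rcases hsp : PySem.Str.split₀ mention with _ | ⟨t0, rest⟩
  · -- empty phrase: first occurrence is 0 on both sides
    have hcons : PySem.List.pyRange 0
        ((tokens.length : Int) - ((([] : List String)).length : Int) + 1) 1
        = 0 :: PySem.List.pyRange 1
            ((tokens.length : Int) - ((([] : List String)).length : Int) + 1) 1 :=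
      PySem.List.pyRange_one_cons (by simp only [List.length_nil, Nat.cast_zero]; omega)
    have hP : PySem.List.slice tokens (some 0)
        (some ((0:Int) + ((([] : List String)).length : Int))) = ([] : List String) := by
      have := PySem.List.slice_natCast_add tokens 0 0
      push_cast at this ⊢
      simpa using this
    rw [pvScanA_eq_find?, hcons, List.find?_cons_of_pos (by simpa using hP)]
    simp [pvFirstOcc, pvTagB_eq_pvTagA]
  · rw [pvScanA_eq_find?, pvFind_eq]
    simp only [pvFirstOcc]
    rcases hf : pvFindB tokens (t0 :: rest)
        (((PySem.List.enumerate tokens 0).foldl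
          (fun d q => d.modify q.2 [] (fun l => l ++ [q.1])) PySem.Dict.empty).getD t0 []) with
      _ | p
    · simp only [hf]
    · simp only [hf, pvTagB_eq_pvTagA]

-- ===== VERDICT (by name: the statement is the Claim_ definition above) =====
theorem tag_tokens_spec : Claim_equal_tag_tokens := by
  intro text entities_dict _ _
  show tag_tokens text entities_dict = tag_tokens_alt text entities_dict
  unfold tag_tokens tag_tokens_alt
  show ((PySem.Str.split₀ text),
      (PySem.Dict.ofList entities_dict).items.foldl
        (fun l ev => ev.2.foldl (pvStepA (PySem.Str.split₀ text) ev.1) l)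
        (List.replicate (PySem.Str.split₀ text).length "O"))
    = ((PySem.Str.split₀ text),
      (PySem.Dict.ofList entities_dict).items.foldl
        (fun l ev => ev.2.foldl (pvStepB (PySem.Str.split₀ text) ev.1) l)
        (List.replicate (PySem.Str.split₀ text).length "O"))
  have hstep : (fun (l : List String) (ev : String × List String) =>
      ev.2.foldl (pvStepA (PySem.Str.split₀ text) ev.1) l)
      = (fun l ev => ev.2.foldl (pvStepB (PySem.Str.split₀ text) ev.1) l) := by
    funext l ev
    have : pvStepA (PySem.Str.split₀ text) ev.1 = pvStepB (PySem.Str.split₀ text) ev.1 := by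
      funext labels mention
      exact pvMention_eq (PySem.Str.split₀ text) ev.1 mention labels
    rw [this]
  rw [hstep]
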